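-- pv_equiv track=rewrite | github.com/JanCBrammer/advent_of_code | year2016/day08/solution.py | rotate_column
-- ===== SOURCE A (Python) =====
-- def rotate_column(
--     column: int, shift: int, screen: list[list[bool]]
-- ) -> list[list[bool]]:
--     shift = shift % len(screen)
--     column_values = [row[column] for row in screen]
--     column_values = column_values[-shift:] + column_values[:-shift]
--     for row, value in enumerate(column_values):
--         screen[row][column] = value
--
--     return screen
-- ===== SOURCE B (Python) =====
-- def rotate_column(
--     column: int, shift: int, screen: list[list[bool]]
-- ) -> list[list[bool]]:
--     n = len(screen)
--     s = shift % n
--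
--     def reverse_rows(lo: int, hi: int) -> None:
--         while lo < hi - 1:
--             screen[lo][column], screen[hi - 1][column] = (
--                 screen[hi - 1][column],
--                 screen[lo][column],
--             )
--             lo += 1
--             hi -= 1
--
--     reverse_rows(0, n)
--     reverse_rows(0, s)
--     reverse_rows(s, n)
--     return screen
-- ===== Notes on version B (the rewrite author's own statement) =====
-- stated objective: alternative
-- what changed: Instead of snapshotting the column and writing back a slice-concatenated rotated copy, B rotates the column in place with the classic three-reversal trick: reverse the whole column by end-swaps, then reverse the first s cells and the remaining n-s cells.
import Mathlib
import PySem

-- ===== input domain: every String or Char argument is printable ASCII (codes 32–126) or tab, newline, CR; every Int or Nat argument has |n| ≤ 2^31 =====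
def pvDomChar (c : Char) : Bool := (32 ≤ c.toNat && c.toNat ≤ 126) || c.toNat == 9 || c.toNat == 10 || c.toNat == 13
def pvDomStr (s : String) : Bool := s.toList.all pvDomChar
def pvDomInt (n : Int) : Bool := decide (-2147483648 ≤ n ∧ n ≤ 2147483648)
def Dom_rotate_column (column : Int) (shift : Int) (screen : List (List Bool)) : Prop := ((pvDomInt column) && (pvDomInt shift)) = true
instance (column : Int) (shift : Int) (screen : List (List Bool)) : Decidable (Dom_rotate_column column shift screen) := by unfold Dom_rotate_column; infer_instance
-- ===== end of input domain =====

-- B rotates the column by the in-place three-reversal trick (reverse whole column, then each part)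
-- instead of A's snapshot-and-write-back-rotated-slice pass; equivalence is about the RETURN value
-- (both Pythons also mutate `screen` in place alike).

-- ===== PORT A =====
def rotate_column (column : Int) (shift : Int) (screen : List (List Bool)) : List (List Bool) :=
  let s := PySem.Int.mod shift (screen.length : Int)
  let columnValues := screen.map (fun row => PySem.List.pyGetD row column false)
  let rotated := PySem.List.slice columnValues (some (-s)) none ++
                 PySem.List.slice columnValues none (some (-s))
  (PySem.List.enumerate rotated).foldl
    (fun scr rv =>
      PySem.List.pySetD scr rv.1
        (PySem.List.pySetD (PySem.List.pyGetD scr rv.1 []) column rv.2)) screen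

-- ===== PORT B =====
-- port of B's nested helper reverse_rows: reverse the column cells of rows lo..hi-1 by swapping ends
def rev_rows (column : Int) (lo hi : Int) (scr : List (List Bool)) : List (List Bool) :=
  if lo < hi - 1 then
    let a := PySem.List.pyGetD (PySem.List.pyGetD scr (hi - 1) []) column false
    let b := PySem.List.pyGetD (PySem.List.pyGetD scr lo []) column false
    let scr1 := PySem.List.pySetD scr lo (PySem.List.pySetD (PySem.List.pyGetD scr lo []) column a)
    let scr2 := PySem.List.pySetD scr1 (hi - 1) (PySem.List.pySetD (PySem.List.pyGetD scr1 (hi - 1) []) column b)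
    rev_rows column (lo + 1) (hi - 1) scr2
  else scr
termination_by (hi - lo).toNat
decreasing_by omega

def rotate_column_alt (column : Int) (shift : Int) (screen : List (List Bool)) : List (List Bool) :=
  let n : Int := (screen.length : Int)
  let s := PySem.Int.mod shift n
  let scr1 := rev_rows column 0 n screen
  let scr2 := rev_rows column 0 s scr1
  rev_rows column s n scr2

-- ===== PRECONDITION & SPEC =====
-- Pre_ excludes exactly where Python A raises: ZeroDivisionError on an empty screen,
-- IndexError when `column` is out of range for some row.
def Pre_rotate_column (column : Int) (shift : Int) (screen : List (List Bool)) : Prop :=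
  screen ≠ [] ∧ ∀ row ∈ screen, PySem.Raise.InRange row.length column
instance (column : Int) (shift : Int) (screen : List (List Bool)) : Decidable (Pre_rotate_column column shift screen) := by unfold Pre_rotate_column; infer_instance

def pvWitness_rotate_column : Int × Int × List (List Bool) := (0, 3, [[true], [false]])

def Spec_rotate_column (column : Int) (shift : Int) (screen : List (List Bool)) (out : List (List Bool)) : Prop := out = rotate_column_alt column shift screen
instance (column : Int) (shift : Int) (screen : List (List Bool)) (out : List (List Bool)) : Decidable (Spec_rotate_column column shift screen out) := by unfold Spec_rotate_column; infer_instance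

-- ===== CLAIM (what is proved, stated in full; the proofs are below) =====
def Claim_equal_rotate_column : Prop := ∀ (column : Int) (shift : Int) (screen : List (List Bool)), Dom_rotate_column column shift screen → Pre_rotate_column column shift screen → Spec_rotate_column column shift screen (rotate_column column shift screen)

-- ===== LEMMAS AND PROOFS =====

lemma pyIdx_some (n : Nat) (i : Int) (h : PySem.Raise.InRange n i) :
    ∃ j : Nat, j < n ∧ PySem.List.pyIdx? n i = some j := by
  obtain ⟨h1, h2⟩ := h
  unfold PySem.List.pyIdx?
  split_ifs with ha
  · exact ⟨i.toNat, by omega, rfl⟩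
  · exact ⟨n - (-i).toNat, by omega, rfl⟩

lemma fact_get_set (r : List Bool) (i : Int) (v : Bool) (d : Bool)
    (h : PySem.Raise.InRange r.length i) :
    PySem.List.pyGetD (PySem.List.pySetD r i v) i d = v := by
  obtain ⟨j, hj, hidx⟩ := pyIdx_some r.length i h
  simp [PySem.List.pyGetD, PySem.List.pyGet?, PySem.List.pySetD, PySem.List.pySet?, hidx, hj]

lemma fact_set_set (r : List Bool) (i : Int) (a b : Bool) :
    PySem.List.pySetD (PySem.List.pySetD r i a) i b = PySem.List.pySetD r i b := by
  unfold PySem.List.pySetD PySem.List.pySet?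
  cases hidx : PySem.List.pyIdx? r.length i with
  | none => simp [hidx]
  | some j => simp [hidx]

lemma fact_set_get (r : List Bool) (i : Int) (d : Bool)
    (h : PySem.Raise.InRange r.length i) :
    PySem.List.pySetD r i (PySem.List.pyGetD r i d) = r := by
  obtain ⟨j, hj, hidx⟩ := pyIdx_some r.length i h
  simp [PySem.List.pyGetD, PySem.List.pyGet?, PySem.List.pySetD, PySem.List.pySet?, hidx, hj]

def colOf (column : Int) (scr : List (List Bool)) : List Bool :=
  scr.map (fun r => PySem.List.pyGetD r column false)

def wcol (column : Int) (scr : List (List Bool)) (vals : List Bool) : List (List Bool) :=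
  List.zipWith (fun r v => PySem.List.pySetD r column v) scr vals

lemma length_wcol (column : Int) (scr : List (List Bool)) (vals : List Bool)
    (h : vals.length = scr.length) : (wcol column scr vals).length = scr.length := by
  simp [wcol, h]

lemma wcol_self (column : Int) (scr : List (List Bool))
    (hin : ∀ r ∈ scr, PySem.Raise.InRange r.length column) :
    wcol column scr (colOf column scr) = scr := by
  apply List.ext_getElem
  · simp [wcol, colOf]
  · intro i h1 h2
    simp only [wcol, colOf, List.getElem_zipWith, List.getElem_map]
    exact fact_set_get _ _ _ (hin _ (List.getElem_mem h2))

lemma wcol_write (column : Int) (scr : List (List Bool)) (u : List Bool) (v : Bool) (r : Nat)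
    (hu : u.length = scr.length) (hr : r < scr.length) :
    PySem.List.pySetD (wcol column scr u) (r : Int)
      (PySem.List.pySetD (PySem.List.pyGetD (wcol column scr u) (r : Int) []) column v)
      = wcol column scr (u.set r v) := by
  have hlen : (wcol column scr u).length = scr.length := length_wcol column scr u hu
  have hget : PySem.List.pyGetD (wcol column scr u) (r : Int) [] = (wcol column scr u)[r]'(by omega) := by
    rw [PySem.List.pyGetD_natCast, List.getD_eq_getElem?_getD, List.getElem?_eq_getElem (by omega)]
    rfl
  rw [hget, PySem.List.pySetD_natCast]
  apply List.ext_getElem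
  · simp [wcol, hu]
  · intro i h1 h2
    rw [List.getElem_set]
    by_cases hir : r = i
    · subst hir
      simp only [wcol, List.getElem_zipWith, List.getElem_set_self]
      exact fact_set_set _ _ _ _
    · simp only [wcol, List.getElem_zipWith, if_neg hir]
      congr 1
      rw [List.getElem_set_ne hir]

lemma foldA' (column : Int) : ∀ (vals : List Bool) (rest pre : List (List Bool)), vals.length = rest.length →
    (PySem.List.enumerate vals (pre.length : Int)).foldl
      (fun scr rv => PySem.List.pySetD scr rv.1
        (PySem.List.pySetD (PySem.List.pyGetD scr rv.1 []) column rv.2)) (pre ++ rest)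
    = pre ++ wcol column rest vals := by
  intro vals
  induction vals with
  | nil =>
    intro rest pre h
    cases rest with
    | nil => simp [PySem.List.enumerate_nil, wcol]
    | cons r rt => simp at h
  | cons v vt ih =>
    intro rest pre h
    cases rest with
    | nil => simp at h
    | cons r rt =>
      rw [PySem.List.enumerate_cons, List.foldl_cons]
      have hget : PySem.List.pyGetD (pre ++ r :: rt) (pre.length : Int) [] = r := by
        rw [PySem.List.pyGetD_natCast, List.getD_eq_getElem?_getD, List.getElem?_append_right (le_refl _)]
        simp
      have hset : PySem.List.pySetD (pre ++ r :: rt) (pre.length : Int) (PySem.List.pySetD r column v)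
          = pre ++ PySem.List.pySetD r column v :: rt := by
        rw [PySem.List.pySetD_natCast]
        rw [List.set_append_right _ _ (le_refl _)]
        simp
      rw [hget, hset]
      have harr : ((pre.length : Int) + 1) = ((pre ++ [PySem.List.pySetD r column v]).length : Int) := by
        simp
      rw [harr]
      have hassoc : pre ++ PySem.List.pySetD r column v :: rt
          = (pre ++ [PySem.List.pySetD r column v]) ++ rt := by simp
      rw [hassoc, ih rt _ (by simpa using h)]
      simp [wcol]

lemma pyGetD_wcol (column : Int) (scr : List (List Bool)) (u : List Bool)
    (h : u.length = scr.length) (r : Nat) (hr : r < scr.length) :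
    PySem.List.pyGetD (wcol column scr u) (r : Int) []
      = PySem.List.pySetD (scr[r]'hr) column (u[r]'(by omega)) := by
  rw [PySem.List.pyGetD_natCast, List.getD_eq_getElem?_getD,
      List.getElem?_eq_getElem (by rw [length_wcol column scr u h]; exact hr)]
  simp [wcol]

lemma rotated_eq (old : List Bool) (s : Int) (hs0 : 0 ≤ s) (hsn : s < (old.length : Int)) :
    PySem.List.slice old (some (-s)) none ++ PySem.List.slice old none (some (-s))
    = old.drop (old.length - s.toNat) ++ old.take (old.length - s.toNat) := by
  rcases eq_or_lt_of_le hs0 with h0 | hpos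
  · rw [← h0]
    simp [PySem.List.slice_none_none, PySem.List.slice_to old (le_refl (0:Int))]
  · obtain ⟨k, rfl⟩ : ∃ k : Nat, s = (k : Int) := ⟨s.toNat, by omega⟩
    have hk : 0 < k := by exact_mod_cast hpos
    rw [PySem.List.slice_from_neg_natCast old k hk, PySem.List.slice_to_neg_natCast old k hk]
    simp

def segRev (u : List Bool) (lo hi : Int) : List Bool :=
  if lo < hi - 1 then
    segRev ((u.set lo.toNat (u.getD (hi-1).toNat false)).set (hi-1).toNat (u.getD lo.toNat false)) (lo + 1) (hi - 1)
  else u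
termination_by (hi - lo).toNat
decreasing_by omega

lemma pyGetD_wcol' (column : Int) (scr : List (List Bool)) (u : List Bool)
    (h : u.length = scr.length) (i : Int) (r : Nat) (hr : r < scr.length) (hir : i = (r : Int)) :
    PySem.List.pyGetD (wcol column scr u) i []
      = PySem.List.pySetD (scr[r]'hr) column (u[r]'(by omega)) := by
  subst hir
  exact pyGetD_wcol column scr u h r hr

lemma wcol_write' (column : Int) (scr : List (List Bool)) (u : List Bool) (v : Bool)
    (i : Int) (r : Nat) (hu : u.length = scr.length) (hr : r < scr.length) (hir : i = (r : Int)) :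
    PySem.List.pySetD (wcol column scr u) i
      (PySem.List.pySetD (PySem.List.pyGetD (wcol column scr u) i []) column v)
      = wcol column scr (u.set r v) := by
  subst hir
  exact wcol_write column scr u v r hu hr

lemma rev_segRev (column : Int) (scr : List (List Bool))
    (hin : ∀ r ∈ scr, PySem.Raise.InRange r.length column) :
    ∀ (k : Nat) (lo hi : Int) (u : List Bool), (hi - lo).toNat = k →
    u.length = scr.length → 0 ≤ lo → hi ≤ (scr.length : Int) →
    rev_rows column lo hi (wcol column scr u) = wcol column scr (segRev u lo hi) := by
  intro k
  induction k using Nat.strong_induction_on with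
  | _ k ih =>
    intro lo hi u hk hu hlo hhi
    rw [rev_rows, segRev]
    by_cases hc : lo < hi - 1
    · rw [if_pos hc, if_pos hc]
      dsimp only
      have hL : lo = ((lo.toNat : Nat) : Int) := by omega
      have hH : hi - 1 = (((hi - 1).toNat : Nat) : Int) := by omega
      have hLm : lo.toNat < scr.length := by omega
      have hHm : (hi - 1).toNat < scr.length := by omega
      have ha : PySem.List.pyGetD (PySem.List.pyGetD (wcol column scr u) (hi - 1) []) column false
          = u[(hi - 1).toNat]'(by omega) := by
        rw [pyGetD_wcol' column scr u hu _ _ hHm (by omega)]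
        exact fact_get_set _ _ _ _ (hin _ (List.getElem_mem _))
      have hb : PySem.List.pyGetD (PySem.List.pyGetD (wcol column scr u) lo []) column false
          = u[lo.toNat]'(by omega) := by
        rw [pyGetD_wcol' column scr u hu _ _ hLm (by omega)]
        exact fact_get_set _ _ _ _ (hin _ (List.getElem_mem _))
      rw [ha, hb]
      have hw1 : PySem.List.pySetD (wcol column scr u) lo
          (PySem.List.pySetD (PySem.List.pyGetD (wcol column scr u) lo []) column
            (u[(hi - 1).toNat]'(by omega)))
          = wcol column scr (u.set lo.toNat (u[(hi - 1).toNat]'(by omega))) := by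
        exact wcol_write' column scr u _ lo lo.toNat hu hLm (by omega)
      rw [hw1]
      have hu1 : (u.set lo.toNat (u[(hi - 1).toNat]'(by omega))).length = scr.length := by
        simp [hu]
      have hw2 : PySem.List.pySetD (wcol column scr (u.set lo.toNat (u[(hi - 1).toNat]'(by omega)))) (hi - 1)
          (PySem.List.pySetD
            (PySem.List.pyGetD (wcol column scr (u.set lo.toNat (u[(hi - 1).toNat]'(by omega)))) (hi - 1) []) column
            (u[lo.toNat]'(by omega)))
          = wcol column scr ((u.set lo.toNat (u[(hi - 1).toNat]'(by omega))).set (hi - 1).toNat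
              (u[lo.toNat]'(by omega))) := by
        exact wcol_write' column scr _ _ (hi - 1) (hi - 1).toNat hu1 hHm (by omega)
      rw [hw2]
      have hgd1 : u.getD (hi-1).toNat false = u[(hi - 1).toNat]'(by omega) := by
        rw [List.getD_eq_getElem?_getD, List.getElem?_eq_getElem (by omega)]
        rfl
      have hgd2 : u.getD lo.toNat false = u[lo.toNat]'(by omega) := by
        rw [List.getD_eq_getElem?_getD, List.getElem?_eq_getElem (by omega)]
        rfl
      rw [ih (hi - 1 - (lo + 1)).toNat (by omega) (lo + 1) (hi - 1) _ rfl (by simp [hu]) (by omega) (by omega)]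
      rw [hgd1, hgd2]
    · rw [if_neg hc, if_neg hc]

lemma reverse_short (l : List Bool) (h : l.length ≤ 1) : l.reverse = l := by
  cases l with
  | nil => rfl
  | cons x t =>
    cases t with
    | nil => rfl
    | cons y s => simp at h

lemma segRev_eq : ∀ (k : Nat) (u : List Bool) (lo hi : Int), (hi - lo).toNat = k →
    0 ≤ lo → lo ≤ hi → hi ≤ (u.length : Int) →
    segRev u lo hi
      = u.take lo.toNat ++ ((u.take hi.toNat).drop lo.toNat).reverse ++ u.drop hi.toNat := by
  intro k
  induction k using Nat.strong_induction_on with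
  | _ k ih =>
    intro u lo hi hk hlo hlh hhi
    rw [segRev]
    set L := lo.toNat with hLdef
    set H := hi.toNat with hHdef
    have hLH : L ≤ H := by omega
    have hHu : H ≤ u.length := by omega
    by_cases hc : lo < hi - 1
    · rw [if_pos hc]
      have hLH1 : L + 1 < H := by omega
      have hgd1 : u.getD (hi-1).toNat false = u[H-1]'(by omega) := by
        rw [List.getD_eq_getElem?_getD, show (hi-1).toNat = H - 1 by omega,
            List.getElem?_eq_getElem (by omega)]
        rfl
      have hgd2 : u.getD lo.toNat false = u[L]'(by omega) := by
        rw [List.getD_eq_getElem?_getD, List.getElem?_eq_getElem (by omega)]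
        rfl
      rw [hgd1, hgd2, show (hi-1).toNat = H - 1 by omega]
      set u' := (u.set L (u[H-1]'(by omega))).set (H-1) (u[L]'(by omega)) with hu'
      have hul : u'.length = u.length := by simp [hu']
      rw [ih (hi - 1 - (lo + 1)).toNat (by omega) u' (lo + 1) (hi - 1) rfl (by omega) (by omega)
            (by rw [hul]; omega)]
      rw [show (lo+1).toNat = L + 1 by omega, show (hi-1).toNat = H - 1 by omega]
      have hux : ∀ (t : Nat) (ht : t < u.length), t ≠ L → t ≠ H - 1 → u'[t]'(by omega) = u[t]'ht := by
        intro t ht h1 h2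
        simp only [hu']
        rw [List.getElem_set_ne (by omega), List.getElem_set_ne (by omega)]
      have huL : u'[L]'(by omega) = u[H-1]'(by omega) := by
        simp only [hu']
        rw [List.getElem_set_ne (by omega), List.getElem_set_self (by simp; omega)]
      have huH : u'[H-1]'(by omega) = u[L]'(by omega) := by
        simp only [hu']
        rw [List.getElem_set_self (by simp; omega)]
      have hp1 : u'.take (L+1) = u.take L ++ [u[H-1]'(by omega)] := by
        apply List.ext_getElem
        · rw [List.length_take, hul]
          simp [List.length_take]
          omega
        · intro t ht1 ht2
          rw [List.getElem_take]
          by_cases htL : t = L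
          · subst htL
            rw [List.getElem_append_right (by rw [List.length_take]; omega)]
            simpa using huL
          · have htL' : t < L := by rw [List.length_take] at ht1; omega
            rw [List.getElem_append_left (by rw [List.length_take]; omega)]
            rw [List.getElem_take]
            exact hux t (by omega) htL (by omega)
      have hp2 : u'.drop (H-1) = (u[L]'(by omega)) :: u.drop H := by
        rw [List.drop_eq_getElem_cons (by omega)]
        rw [show H - 1 + 1 = H by omega]
        congr 1
        apply List.ext_getElem
        · simp [hul]
        · intro t ht1 ht2
          rw [List.getElem_drop, List.getElem_drop]
          exact hux (H + t) (by rw [List.length_drop, hul] at ht1; omega) (by omega) (by omega)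
      have hp3 : (u'.take (H-1)).drop (L+1) = (u.take (H-1)).drop (L+1) := by
        apply List.ext_getElem
        · simp [hul]
        · intro t ht1 ht2
          rw [List.getElem_drop, List.getElem_drop, List.getElem_take, List.getElem_take]
          have hb : L + 1 + t < H - 1 := by
            rw [List.length_drop, List.length_take, hul] at ht1
            omega
          exact hux (L+1+t) (by omega) (by omega) (by omega)
      have hp4 : (u.take H).drop L
          = (u[L]'(by omega)) :: ((u.take (H-1)).drop (L+1) ++ [u[H-1]'(by omega)]) := by
        rw [List.drop_eq_getElem_cons (by rw [List.length_take]; omega)]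
        congr 1
        · exact List.getElem_take
        · rw [show u.take H = u.take (H-1) ++ [u[H-1]'(by omega)] by
              rw [List.take_concat_get' u (H-1) (by omega), show H - 1 + 1 = H by omega]]
          rw [List.drop_append_of_le_length (by rw [List.length_take]; omega)]
      rw [hp1, hp2, hp3, hp4]
      simp

    · rw [if_neg hc]
      have hseg : ((u.take H).drop L).reverse = (u.take H).drop L := by
        apply reverse_short
        rw [List.length_drop, List.length_take]
        omega
      rw [hseg]
      rw [show u.take L = (u.take H).take L by rw [List.take_take]; congr 1; omega]
      rw [List.take_append_drop, List.take_append_drop]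

lemma length_segRev : ∀ (k : Nat) (u : List Bool) (lo hi : Int), (hi - lo).toNat = k →
    (segRev u lo hi).length = u.length := by
  intro k
  induction k using Nat.strong_induction_on with
  | _ k ih =>
    intro u lo hi hk
    rw [segRev]
    by_cases hc : lo < hi - 1
    · rw [if_pos hc]
      rw [ih (hi - 1 - (lo + 1)).toNat (by omega) _ (lo + 1) (hi - 1) rfl]
      simp
    · rw [if_neg hc]

lemma rotate_eq_alt (column : Int) (shift : Int) (screen : List (List Bool))
    (hne : screen ≠ []) (hin : ∀ row ∈ screen, PySem.Raise.InRange row.length column) :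
    rotate_column column shift screen = rotate_column_alt column shift screen := by
  have hm : 0 < screen.length := List.length_pos_of_ne_nil hne
  have hn : 0 < (screen.length : Int) := by exact_mod_cast hm
  unfold rotate_column rotate_column_alt
  dsimp only
  set s := PySem.Int.mod shift (screen.length : Int) with hs
  have hs0 : 0 ≤ s := PySem.Int.mod_nonneg _ hn
  have hsn : s < (screen.length : Int) := PySem.Int.mod_lt _ hn
  have hml : (colOf column screen).length = screen.length := by simp [colOf]
  -- A side
  rw [show screen.map (fun row => PySem.List.pyGetD row column false) = colOf column screen from rfl]
  rw [rotated_eq (colOf column screen) s hs0 (by rw [hml]; exact hsn)]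
  have hrl : ((colOf column screen).drop ((colOf column screen).length - s.toNat)
      ++ (colOf column screen).take ((colOf column screen).length - s.toNat)).length
      = screen.length := by
    rw [List.length_append, List.length_drop, List.length_take]
    omega
  have hA := foldA' column
    ((colOf column screen).drop ((colOf column screen).length - s.toNat)
      ++ (colOf column screen).take ((colOf column screen).length - s.toNat)) screen []
    (by rw [hrl])
  simp only [List.length_nil, Nat.cast_zero, List.nil_append] at hA
  rw [hA]
  -- B side: three in-place segment reversals, lifted to the value level
  have h1 := rev_segRev column screen hin ((screen.length : Int) - 0).toNat 0
    (screen.length : Int) (colOf column screen) rfl hml (le_refl 0) (le_refl _)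
  rw [wcol_self column screen hin] at h1
  have hl1 : (segRev (colOf column screen) 0 (screen.length : Int)).length = screen.length := by
    rw [length_segRev _ _ 0 _ rfl, hml]
  have h2 := rev_segRev column screen hin (s - 0).toNat 0 s
    (segRev (colOf column screen) 0 (screen.length : Int)) rfl hl1 (le_refl 0) (by omega)
  have hl2 : (segRev (segRev (colOf column screen) 0 (screen.length : Int)) 0 s).length
      = screen.length := by
    rw [length_segRev _ _ 0 _ rfl, hl1]
  have h3 := rev_segRev column screen hin ((screen.length : Int) - s).toNat s
    (screen.length : Int) (segRev (segRev (colOf column screen) 0 (screen.length : Int)) 0 s)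
    rfl hl2 hs0 (le_refl _)
  rw [h1, h2, h3]
  congr 1
  -- value level
  set old := colOf column screen with holddef
  have hmlo : old.length = screen.length := hml
  have hv1 : segRev old 0 (screen.length : Int) = old.reverse := by
    rw [segRev_eq _ _ 0 _ rfl (le_refl 0) (by omega) (by omega)]
    simp only [Int.toNat_zero, List.take_zero, List.drop_zero, List.nil_append]
    rw [List.take_of_length_le (by omega), List.drop_of_length_le (by omega), List.append_nil]
  rw [hv1]
  have hrevlen : old.reverse.length = screen.length := by simp [hmlo]
  have hv2 : segRev old.reverse 0 s
      = (old.reverse.take s.toNat).reverse ++ old.reverse.drop s.toNat := by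
    rw [segRev_eq _ _ 0 _ rfl (le_refl 0) (by omega) (by rw [hrevlen]; omega)]
    simp only [Int.toNat_zero, List.take_zero, List.drop_zero, List.nil_append]
  rw [hv2]
  have hAlen : ((old.reverse.take s.toNat).reverse).length = s.toNat := by
    rw [List.length_reverse, List.length_take]
    omega
  have hv3 : segRev ((old.reverse.take s.toNat).reverse ++ old.reverse.drop s.toNat) s
      (screen.length : Int)
      = (old.reverse.take s.toNat).reverse ++ (old.reverse.drop s.toNat).reverse := by
    have hwlen : ((old.reverse.take s.toNat).reverse ++ old.reverse.drop s.toNat).length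
        = screen.length := by
      rw [List.length_append, hAlen, List.length_drop]
      omega
    rw [segRev_eq _ _ s _ rfl hs0 (by omega) (by simp [hwlen])]
    simp only [Int.toNat_natCast]
    rw [List.take_of_length_le (le_of_eq hwlen), List.drop_of_length_le (le_of_eq hwlen),
        List.append_nil]
    rw [List.take_left' hAlen, List.drop_left' hAlen]
  rw [hv3]
  have hta : old.reverse.take s.toNat = (old.drop (old.length - s.toNat)).reverse :=
    List.take_reverse
  have htb : old.reverse.drop s.toNat = (old.take (old.length - s.toNat)).reverse :=
    List.drop_reverse
  rw [hta, htb, List.reverse_reverse, List.reverse_reverse]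

-- ===== VERDICT (by name: the statement is the Claim_ definition above) =====
theorem rotate_column_spec : Claim_equal_rotate_column := by
  intro column shift screen _hdom hpre
  unfold Spec_rotate_column
  exact rotate_eq_alt column shift screen hpre.1 hpre.2
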